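-- pv_equiv track=rewrite | github.com/abhiram1809/VN_Game_Generator | All_Functions.py | extract_prompts_and_Process_results
-- ===== SOURCE A (Python) =====
-- def extract_prompts_and_Process_results(result):
--     string_list = result.split("746859")
--     Image_prompt_inputs = []
--     processed_result = []
--     for i in range(len(string_list)):
--         lines = string_list[i].split("\n")
--         lines = lines[2:]
--         result_string = "\n".join(lines)
--         if len(result_string) < 750:
--             pass
--         else:
--             processed_result.append(result_string)
--             lines = result_string.split("\n")
--             lines = lines[:5]
--             result_string = "\n".join(lines)
--             Image_prompt_inputs.append(result_string)
--     return Image_prompt_inputs, processed_result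
-- ===== SOURCE B (Python) =====
-- def extract_prompts_and_Process_results(result):
--     # Recursive decomposition: consume the chunk list head-first and build both
--     # output lists back-to-front by prepending after the recursive call returns.
--     def go(chunks):
--         if not chunks:
--             return [], []
--         head, rest = chunks[0], chunks[1:]
--         prompts, kept = go(rest)
--         body = "\n".join(head.split("\n")[2:])
--         if len(body) >= 750:
--             return ["\n".join(body.split("\n")[:5])] + prompts, [body] + kept
--         return prompts, kept
--     return go(result.split("746859"))
-- ===== Notes on version B (the rewrite author's own statement) =====
-- stated objective: alternative
-- what changed: B replaces A's index loop with append-accumulators by a structural recursion over the chunk list that builds both result lists back-to-front, prepending each kept body and its prompt after the recursive call returns.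
import Mathlib
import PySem

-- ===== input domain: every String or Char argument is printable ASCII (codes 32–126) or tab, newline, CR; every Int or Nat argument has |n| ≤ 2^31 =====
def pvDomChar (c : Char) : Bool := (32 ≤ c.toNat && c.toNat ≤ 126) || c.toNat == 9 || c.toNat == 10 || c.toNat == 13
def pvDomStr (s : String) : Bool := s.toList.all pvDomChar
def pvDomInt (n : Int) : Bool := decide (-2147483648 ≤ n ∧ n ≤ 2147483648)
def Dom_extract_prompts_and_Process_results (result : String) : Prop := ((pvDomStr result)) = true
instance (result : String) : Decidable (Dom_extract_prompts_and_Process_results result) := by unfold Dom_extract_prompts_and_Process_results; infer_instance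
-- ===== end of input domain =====

-- B replaces A's index loop with append-accumulators by a structural recursion over the
-- chunk list that builds both output lists back-to-front (alternative decomposition; same cost).

-- s.split(sep) for the nonempty literal separators used here (split? is some for sep ≠ "")
def pvSplit (s sep : String) : List String := (PySem.Str.split? s sep).getD []

-- ===== PORT A =====
def extract_prompts_and_Process_results (result : String) : List String × List String :=
  let string_list := pvSplit result "746859"
  (PySem.List.pyRange 0 (PySem.List.len string_list) 1).foldl
    (fun (acc : List String × List String) i =>
      let lines := pvSplit (PySem.List.pyGetD string_list i "") "\n"
      let lines := PySem.List.slice lines (some 2) none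
      let result_string := PySem.Str.join "\n" lines
      if PySem.Str.len result_string < 750 then acc
      else
        let processed := acc.2 ++ [result_string]
        let lines := pvSplit result_string "\n"
        let lines := PySem.List.slice lines none (some 5)
        let result_string := PySem.Str.join "\n" lines
        (acc.1 ++ [result_string], processed))
    ([], [])

-- ===== PORT B =====
-- Source B's per-chunk body string ("\n".join(head.split("\n")[2:]))
def pvProc (chunk : String) : String :=
  PySem.Str.join "\n" (PySem.List.slice (pvSplit chunk "\n") (some 2) none)

-- Source B's prompt string ("\n".join(body.split("\n")[:5]))
def pvImg (s : String) : String :=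
  PySem.Str.join "\n" (PySem.List.slice (pvSplit s "\n") none (some 5))

-- the inner recursive helper 'go' of Source B: head-first recursion, prepend after the call
def pvGo : List String → List String × List String
  | [] => ([], [])
  | head :: rest =>
    let r := pvGo rest
    let body := pvProc head
    if 750 ≤ PySem.Str.len body then (pvImg body :: r.1, body :: r.2)
    else r

def extract_prompts_and_Process_results_alt (result : String) : List String × List String :=
  pvGo (pvSplit result "746859")

-- ===== PRECONDITION & SPEC =====
def Spec_extract_prompts_and_Process_results (result : String) (out : List String × List String) : Prop := out = extract_prompts_and_Process_results_alt result
instance (result : String) (out : List String × List String) : Decidable (Spec_extract_prompts_and_Process_results result out) := by unfold Spec_extract_prompts_and_Process_results; infer_instance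

-- ===== CLAIM (what is proved, stated in full; the proofs are below) =====
def Claim_equal_extract_prompts_and_Process_results : Prop := ∀ (result : String), Dom_extract_prompts_and_Process_results result → Spec_extract_prompts_and_Process_results result (extract_prompts_and_Process_results result)

-- ===== LEMMAS AND PROOFS =====

-- A's loop body over the accumulator pair
def pvStep (acc : List String × List String) (chunk : String) : List String × List String :=
  let s := pvProc chunk
  if PySem.Str.len s < 750 then acc else (acc.1 ++ [pvImg s], acc.2 ++ [s])

theorem pv_fold_eq_go (l : List String) (acc : List String × List String) :
    l.foldl pvStep acc = (acc.1 ++ (pvGo l).1, acc.2 ++ (pvGo l).2) := by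
  induction l generalizing acc with
  | nil => simp [pvGo]
  | cons x xs ih =>
    simp only [List.foldl_cons, pvGo]
    by_cases h : PySem.Str.len (pvProc x) < 750
    · have hs : pvStep acc x = acc := by simp only [pvStep]; rw [if_pos h]
      have hg : ¬ 750 ≤ PySem.Str.len (pvProc x) := by omega
      rw [hs, ih, if_neg hg]
    · have hs : pvStep acc x = (acc.1 ++ [pvImg (pvProc x)], acc.2 ++ [pvProc x]) := by
        simp only [pvStep]; rw [if_neg h]
      have hg : 750 ≤ PySem.Str.len (pvProc x) := by omega
      rw [hs, ih, if_pos hg]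
      simp

-- ===== VERDICT (by name: the statement is the Claim_ definition above) =====
theorem extract_prompts_and_Process_results_spec : Claim_equal_extract_prompts_and_Process_results := by
  intro result _
  unfold Spec_extract_prompts_and_Process_results
  have hA : extract_prompts_and_Process_results result
      = (pvSplit result "746859").foldl pvStep ([], []) :=
    PySem.List.foldl_pyRange_zero_pyGetD (pvSplit result "746859") "" pvStep ([], [])
  rw [hA, pv_fold_eq_go]
  simp [extract_prompts_and_Process_results_alt]
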